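-- pv_equiv track=rewrite | github.com/tulioac/ScriptMatricula | max.py | prettify_name
-- ===== SOURCE A (Python) =====
-- def prettify_name(name):
--     new_name = ""
--     last = " "
--
--     for letter in name.lower():
--         if last == " " or (letter == "i" and last == "I") or last == "(":
--             new_name += letter.upper()
--             last = letter.upper()
--         else:
--             new_name += letter
--             last = letter
--
--     return new_name
-- ===== SOURCE B (Python) =====
-- def _cap(w):
--     k = 0
--     while k < len(w) and w[k] == "i":
--         k += 1
--     if k:
--         return "I" * k + w[k:]
--     return w[:1].upper() + w[1:]
--
-- def prettify_name(name):
--     s = name.lower()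
--     out = []
--     start = 0
--     for j, ch in enumerate(s):
--         if ch in " (":
--             out.append(_cap(s[start:j]))
--             out.append(ch)
--             start = j + 1
--     out.append(_cap(s[start:]))
--     return "".join(out)
-- ===== Notes on version B (the rewrite author's own statement) =====
-- stated objective: alternative
-- what changed: Replaced A's per-character state machine (tracking the previous character to decide capitalization) by a split-at-delimiters / capitalize-each-word / join pipeline: the lowered string is cut at each space or open paren, each piece gets its leading i-run (or else its first character) uppercased, and the pieces are rejoined.
import Mathlib
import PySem

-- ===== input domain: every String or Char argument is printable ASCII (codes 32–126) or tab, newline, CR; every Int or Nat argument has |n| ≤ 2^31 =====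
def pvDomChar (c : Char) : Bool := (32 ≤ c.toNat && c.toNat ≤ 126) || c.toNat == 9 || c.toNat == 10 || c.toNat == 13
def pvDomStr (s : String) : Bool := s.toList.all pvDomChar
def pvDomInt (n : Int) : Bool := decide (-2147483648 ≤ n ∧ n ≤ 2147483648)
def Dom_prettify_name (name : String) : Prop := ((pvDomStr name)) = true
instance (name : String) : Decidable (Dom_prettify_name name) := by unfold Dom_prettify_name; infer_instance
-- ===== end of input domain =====

-- B replaces A's per-character state machine by split-at-delimiters / capitalize-each-word / join (measured faster in a timing run: whole-slice operations instead of per-character branching).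

-- ===== PORT A =====
-- A's loop: state (new_name, last); last is a Python string, ported as List Char.
def pvStepA (st : List Char × List Char) (letter : Char) : List Char × List Char :=
  if st.2 = [' '] ∨ (letter = 'i' ∧ st.2 = ['I']) ∨ st.2 = ['('] then
    (st.1 ++ PySem.Chars.upper [letter], PySem.Chars.upper [letter])
  else
    (st.1 ++ [letter], [letter])

def prettify_name (name : String) : String :=
  String.mk ((PySem.Str.lower name).toList.foldl pvStepA ([], [' '])).1

-- ===== PORT B =====
-- Source B's _cap: uppercase the leading run of i's, else the first character.
def pvCap (w : List Char) : List Char :=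
  let k := (w.takeWhile (fun c => c == 'i')).length
  if k ≠ 0 then List.replicate k 'I' ++ w.drop k
  else PySem.Chars.upper (w.take 1) ++ w.drop 1

def pvNonDelim (c : Char) : Bool := !(c == ' ' || c == '(')

-- Source B's main loop: cut the lowered string at each ' '/'(', cap each piece, rejoin.
def pvJoinB (s : List Char) : List Char :=
  match h : s.dropWhile pvNonDelim with
  | [] => pvCap (s.takeWhile pvNonDelim)
  | d :: r' => pvCap (s.takeWhile pvNonDelim) ++ [d] ++ pvJoinB r'
termination_by s.length
decreasing_by
  have hlen := List.length_dropWhile_le pvNonDelim s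
  simp [h] at hlen; omega

def prettify_name_alt (name : String) : String :=
  String.mk (pvJoinB (PySem.Str.lower name).toList)

-- ===== PRECONDITION & SPEC =====
def Spec_prettify_name (name : String) (out : String) : Prop := out = prettify_name_alt name
instance (name : String) (out : String) : Decidable (Spec_prettify_name name out) := by unfold Spec_prettify_name; infer_instance

-- ===== CLAIM (what is proved, stated in full; the proofs are below) =====
def Claim_equal_prettify_name : Prop := ∀ (name : String), Dom_prettify_name name → Spec_prettify_name name (prettify_name name)

-- ===== LEMMAS AND PROOFS =====

theorem pvChar_eq_iff (c d : Char) : c = d ↔ c.toNat = d.toNat :=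
  ⟨fun h => congrArg Char.toNat h, fun h => Char.ext (UInt32.toNat_inj.mp h)⟩

theorem pvIslower_iff (c : Char) : PySem.Chars.islower c = true ↔ 97 ≤ c.toNat ∧ c.toNat ≤ 122 := by
  simp [PySem.Chars.islower, Char.le_def, UInt32.le_iff_toNat_le]

theorem pvIsupper_iff (c : Char) : PySem.Chars.isupper c = true ↔ 65 ≤ c.toNat ∧ c.toNat ≤ 90 := by
  simp [PySem.Chars.isupper, Char.le_def, UInt32.le_iff_toNat_le]

theorem pvOfNat_toNat (n : Nat) (h : n ≤ 200) : (Char.ofNat n).toNat = n := by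
  rw [Char.toNat_ofNat, if_pos (Or.inl (by omega))]

-- str.lower never produces a capital 'I'
theorem pvLowerChar_ne_I (c : Char) : PySem.Chars.lowerChar c ≠ 'I' := by
  unfold PySem.Chars.lowerChar
  by_cases h : PySem.Chars.isupper c = true
  · rw [if_pos h, ne_eq, pvChar_eq_iff]
    rw [pvIsupper_iff] at h
    rw [pvOfNat_toNat _ (by omega)]
    show ¬ _ = 73
    omega
  · rw [if_neg h, ne_eq, pvChar_eq_iff]
    rw [pvIsupper_iff] at h
    show ¬ _ = 73
    omega

theorem pvNoI_lower (s : List Char) : ∀ c ∈ PySem.Chars.lower s, c ≠ 'I' := by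
  intro c hc
  simp only [PySem.Chars.lower, List.mem_map] at hc
  obtain ⟨x, _, rfl⟩ := hc
  exact pvLowerChar_ne_I x

-- A's loop as plain recursion on the character list (accumulator peeled off).
def pvFoldA : List Char → List Char → List Char
  | [], _ => []
  | c :: cs, last =>
    if last = [' '] ∨ (c = 'i' ∧ last = ['I']) ∨ last = ['('] then
      PySem.Chars.upper [c] ++ pvFoldA cs (PySem.Chars.upper [c])
    else
      c :: pvFoldA cs [c]

theorem pvFoldA_acc (s : List Char) : ∀ (acc last : List Char),
    (s.foldl pvStepA (acc, last)).1 = acc ++ pvFoldA s last := by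
  induction s with
  | nil => intro acc last; simp [pvFoldA]
  | cons c cs ih =>
    intro acc last
    simp only [List.foldl, pvStepA, pvFoldA]
    split_ifs with h
    · rw [ih]; simp
    · rw [ih]; simp

-- after-word states: anything that is not a space, a paren or a capital I …
def pvLastOK (l : List Char) : Prop := l ≠ [' '] ∧ l ≠ ['('] ∧ l ≠ ['I']
-- … or the capital I produced inside a leading i-run
def pvMidOK (l : List Char) : Prop := pvLastOK l ∨ l = ['I']

theorem pvUpperChar_toNat (c : Char) (hi : c.toNat ≠ 105) (hI : c.toNat ≠ 73)
    (hs : c.toNat ≠ 32) (hp : c.toNat ≠ 40) :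
    (PySem.Chars.upperChar c).toNat ≠ 32 ∧ (PySem.Chars.upperChar c).toNat ≠ 40 ∧
      (PySem.Chars.upperChar c).toNat ≠ 73 := by
  unfold PySem.Chars.upperChar
  by_cases h : PySem.Chars.islower c = true
  · rw [if_pos h]
    rw [pvIslower_iff] at h
    rw [pvOfNat_toNat _ (by omega)]
    omega
  · rw [if_neg h]
    exact ⟨hs, hp, hI⟩

theorem pvUpperChar_lastOK (c : Char) (hi : c ≠ 'i') (hI : c ≠ 'I') (hs : c ≠ ' ') (hp : c ≠ '(') :
    pvLastOK (PySem.Chars.upper [c]) := by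
  rw [ne_eq, pvChar_eq_iff] at hi hI hs hp
  obtain ⟨h1, h2, h3⟩ := pvUpperChar_toNat c (by simpa using hi) (by simpa using hI)
    (by simpa using hs) (by simpa using hp)
  refine ⟨fun h => ?_, fun h => ?_, fun h => ?_⟩ <;>
    (simp only [PySem.Chars.upper, List.map_cons, List.map_nil, List.cons.injEq, and_true] at h;
     rw [pvChar_eq_iff] at h)
  exacts [h1 (by simpa using h), h2 (by simpa using h), h3 (by simpa using h)]

theorem pvNonDelim_iff (c : Char) : pvNonDelim c = true ↔ c ≠ ' ' ∧ c ≠ '(' := by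
  simp [pvNonDelim]

theorem pvNonDelim_false_iff (c : Char) : pvNonDelim c = false ↔ c = ' ' ∨ c = '(' := by
  simp [pvNonDelim]
  tauto

-- in a non-special state the next step does not look at the state's value
theorem pvFoldA_cong (s : List Char) : ∀ (l₁ l₂ : List Char), pvLastOK l₁ → pvLastOK l₂ →
    pvFoldA s l₁ = pvFoldA s l₂ := by
  induction s with
  | nil => intro _ _ _ _; rfl
  | cons c cs ih =>
    intro l₁ l₂ h₁ h₂
    obtain ⟨a₁, b₁, c₁⟩ := h₁
    obtain ⟨a₂, b₂, c₂⟩ := h₂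
    simp only [pvFoldA]
    rw [if_neg (by tauto), if_neg (by tauto)]

-- within a word, in a non-special state, characters pass through unchanged
theorem pvFoldA_word (w : List Char) : ∀ (r l : List Char),
    (∀ c ∈ w, pvNonDelim c = true ∧ c ≠ 'I') → pvLastOK l →
    pvFoldA (w ++ r) l = w ++ pvFoldA r l := by
  induction w with
  | nil => intro r l _ _; rfl
  | cons c cs ih =>
    intro r l hw hl
    have hc := hw c (by simp)
    have hcs : ∀ x ∈ cs, pvNonDelim x = true ∧ x ≠ 'I' := fun x hx => hw x (by simp [hx])
    have hnd : c ≠ ' ' ∧ c ≠ '(' := (pvNonDelim_iff c).mp hc.1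
    obtain ⟨a, b, d⟩ := hl
    simp only [List.cons_append, pvFoldA]
    rw [if_neg (by tauto)]
    have hok : pvLastOK [c] := ⟨by simpa using hnd.1, by simpa using hnd.2, by simpa using hc.2⟩
    rw [ih r [c] hcs hok, pvFoldA_cong r [c] l hok ⟨a, b, d⟩]

-- a run of i's after a capital I stays capitalized
theorem pvFoldA_irun (k : Nat) : ∀ (r : List Char),
    pvFoldA (List.replicate k 'i' ++ r) ['I'] = List.replicate k 'I' ++ pvFoldA r ['I'] := by
  induction k with
  | zero => intro r; rfl
  | succ n ih =>
    intro r
    simp only [List.replicate_succ, List.cons_append, pvFoldA]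
    rw [if_pos (by simp)]
    have h : PySem.Chars.upper ['i'] = ['I'] := by decide
    rw [h, ih]
    rfl

-- a delimiter passes through unchanged from any after-word state
theorem pvFoldA_delim (d : Char) (t l : List Char) (hm : pvMidOK l) (hd : pvNonDelim d = false) :
    pvFoldA (d :: t) l = d :: pvFoldA t [d] := by
  have hd' := (pvNonDelim_false_iff d).mp hd
  simp only [pvFoldA]
  rw [if_neg]
  rcases hm with ⟨a, b, c⟩ | rfl
  · tauto
  · rintro (h | ⟨rfl, -⟩ | h)
    · exact absurd h (by decide)
    · rcases hd' with h | h <;> exact absurd h (by decide)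
    · exact absurd h (by decide)

-- a whole word from a boundary state: A capitalizes exactly as Source B's _cap does
theorem pvWordLemma (w r l : List Char) (hw : ∀ c ∈ w, pvNonDelim c = true ∧ c ≠ 'I')
    (hb : l = [' '] ∨ l = ['(']) (hne : w ≠ []) :
    ∃ l', pvMidOK l' ∧ pvFoldA (w ++ r) l = pvCap w ++ pvFoldA r l' := by
  obtain ⟨c, w', rfl⟩ : ∃ c w', w = c :: w' := by
    cases w with
    | nil => exact absurd rfl hne
    | cons c w' => exact ⟨c, w', rfl⟩
  have hcw := hw c (by simp)
  have hcond : (l = [' '] ∨ (c = 'i' ∧ l = ['I']) ∨ l = ['(']) := by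
    rcases hb with rfl | rfl
    · exact Or.inl rfl
    · exact Or.inr (Or.inr rfl)
  by_cases hci : c = 'i'
  · -- leading i-run: decompose the word at the end of the run
    subst hci
    set P : Char → Bool := fun c => c == 'i' with hP
    set iDrop := List.dropWhile P ('i' :: w') with hiDrop
    set k := (List.takeWhile P ('i' :: w')).length with hk
    have hrep : List.takeWhile P ('i' :: w') = List.replicate k 'i' := by
      rw [List.eq_replicate_iff]
      exact ⟨rfl, fun b hb => by simpa [hP] using List.mem_takeWhile_imp hb⟩
    have hsplit : List.replicate k 'i' ++ iDrop = 'i' :: w' := by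
      rw [← hrep, hiDrop, List.takeWhile_append_dropWhile]
    have hdropk : ('i' :: w').drop k = iDrop := by
      conv_lhs => rw [← hsplit]
      have hdl := List.drop_left (l₁ := List.replicate k 'i') (l₂ := iDrop)
      simpa using hdl
    obtain ⟨k', hk'⟩ : ∃ k', k = k' + 1 := by
      refine ⟨k - 1, ?_⟩
      have : List.takeWhile P ('i' :: w') = 'i' :: List.takeWhile P w' :=
        List.takeWhile_cons_of_pos (by simp [hP])
      have hlen := congrArg List.length this
      simp only [hk] at *
      simp [this]
    have hcapw : pvCap ('i' :: w') = List.replicate k 'I' ++ iDrop := by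
      unfold pvCap
      rw [← hP, ← hk, if_pos (by omega), hdropk]
    have hfold : pvFoldA (('i' :: w') ++ r) l =
        List.replicate k 'I' ++ pvFoldA (iDrop ++ r) ['I'] := by
      conv_lhs => rw [← hsplit]
      rw [hk']
      simp only [List.replicate_succ, List.cons_append, List.append_assoc, pvFoldA]
      rw [if_pos (by tauto)]
      have hup : PySem.Chars.upper ['i'] = ['I'] := by decide
      rw [hup, pvFoldA_irun]
      simp
    cases hiD : iDrop with
    | nil =>
      refine ⟨['I'], Or.inr rfl, ?_⟩
      rw [hfold, hcapw, hiD]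
      simp
    | cons c₂ w₂ =>
      have hc2P : P c₂ = false := by
        have h1 : List.dropWhile P ('i' :: w') = c₂ :: w₂ := by rw [← hiDrop]; exact hiD
        have hne' : List.dropWhile P ('i' :: w') ≠ [] := by simp [h1]
        have h2 := List.head_dropWhile_not P hne'
        simpa [h1] using h2
      have hc2i : c₂ ≠ 'i' := by simpa [hP] using hc2P
      have hc2mem : c₂ ∈ 'i' :: w' := (List.dropWhile_sublist P).subset (by rw [← hiDrop, hiD]; simp)
      have hc2 := hw c₂ hc2mem
      have hc2nd : c₂ ≠ ' ' ∧ c₂ ≠ '(' := (pvNonDelim_iff c₂).mp hc2.1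
      have hw₂ : ∀ x ∈ w₂, pvNonDelim x = true ∧ x ≠ 'I' := by
        intro x hx
        exact hw x ((List.dropWhile_sublist P).subset (by rw [← hiDrop, hiD]; simp [hx]))
      have hokc2 : pvLastOK [c₂] :=
        ⟨by simpa using hc2nd.1, by simpa using hc2nd.2, by simpa using hc2.2⟩
      refine ⟨[c₂], Or.inl hokc2, ?_⟩
      rw [hfold, hcapw, hiD]
      simp only [List.cons_append, pvFoldA]
      rw [if_neg (by rintro (h | ⟨h, -⟩ | h) <;> first | exact absurd h (by decide) | exact hc2i h)]
      rw [pvFoldA_word w₂ r [c₂] hw₂ hokc2]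
      simp
  · -- word not starting with i: only the first letter is uppercased
    have hcnd : c ≠ ' ' ∧ c ≠ '(' := (pvNonDelim_iff c).mp hcw.1
    have hok : pvLastOK (PySem.Chars.upper [c]) := pvUpperChar_lastOK c hci hcw.2 hcnd.1 hcnd.2
    have hw' : ∀ x ∈ w', pvNonDelim x = true ∧ x ≠ 'I' := fun x hx => hw x (by simp [hx])
    refine ⟨PySem.Chars.upper [c], Or.inl hok, ?_⟩
    have hcapw : pvCap (c :: w') = PySem.Chars.upper [c] ++ w' := by
      unfold pvCap
      rw [List.takeWhile_cons_of_neg (by simpa using hci)]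
      simp
    rw [hcapw]
    simp only [List.cons_append, pvFoldA]
    rw [if_pos hcond, pvFoldA_word w' r (PySem.Chars.upper [c]) hw' hok]
    simp

theorem pvJoinB_eq_nil {s : List Char} (h : s.dropWhile pvNonDelim = []) :
    pvJoinB s = pvCap (s.takeWhile pvNonDelim) := by
  rw [pvJoinB]
  split
  · rfl
  · next d r' heq => rw [h] at heq; cases heq

theorem pvJoinB_eq_cons {s : List Char} {d : Char} {r' : List Char}
    (h : s.dropWhile pvNonDelim = d :: r') :
    pvJoinB s = pvCap (s.takeWhile pvNonDelim) ++ [d] ++ pvJoinB r' := by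
  rw [pvJoinB]
  split
  · next heq => rw [h] at heq; cases heq
  · next d' r'' heq =>
    rw [h] at heq
    injection heq with h1 h2
    subst h1; subst h2
    rfl

-- main invariant: from a boundary state, A's machine computes B's split/cap/join
theorem pvMain (n : Nat) : ∀ (s : List Char), s.length ≤ n → (∀ c ∈ s, c ≠ 'I') →
    ∀ l, l = [' '] ∨ l = ['('] → pvFoldA s l = pvJoinB s := by
  induction n with
  | zero =>
    intro s hlen _ l _
    have hs : s = [] := List.eq_nil_of_length_eq_zero (by omega)
    subst hs
    rw [pvJoinB]
    simp [pvFoldA, pvCap, PySem.Chars.upper]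
  | succ n ih =>
    intro s hlen hnoI l hb
    cases s with
    | nil =>
      rw [pvJoinB]
      simp [pvFoldA, pvCap, PySem.Chars.upper]
    | cons c cs =>
      by_cases hd : pvNonDelim c = true
      · -- the head starts a word
        have hsplit : (c :: cs).takeWhile pvNonDelim ++ (c :: cs).dropWhile pvNonDelim = c :: cs :=
          List.takeWhile_append_dropWhile
        have hwne : (c :: cs).takeWhile pvNonDelim ≠ [] := by
          rw [List.takeWhile_cons_of_pos hd]; simp
        have hw : ∀ x ∈ (c :: cs).takeWhile pvNonDelim, pvNonDelim x = true ∧ x ≠ 'I' :=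
          fun x hx => ⟨List.mem_takeWhile_imp hx,
            hnoI x ((List.takeWhile_sublist pvNonDelim).subset hx)⟩
        obtain ⟨l', hmid, heq⟩ :=
          pvWordLemma ((c :: cs).takeWhile pvNonDelim) ((c :: cs).dropWhile pvNonDelim) l hw hb hwne
        rw [hsplit] at heq
        rw [heq]
        cases hr : (c :: cs).dropWhile pvNonDelim with
        | nil =>
          rw [pvJoinB_eq_nil hr]
          simp [pvFoldA]
        | cons d t' =>
          have hdd : pvNonDelim d = false := by
            have hne' : (c :: cs).dropWhile pvNonDelim ≠ [] := by simp [hr]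
            have h2 := List.head_dropWhile_not pvNonDelim hne'
            simpa [hr] using h2
          have hdel := (pvNonDelim_false_iff d).mp hdd
          have ht'len : t'.length ≤ n := by
            have h1 := List.length_dropWhile_le pvNonDelim (c :: cs)
            rw [hr] at h1
            simp at h1 hlen
            omega
          have ht'noI : ∀ x ∈ t', x ≠ 'I' := by
            intro x hx
            exact hnoI x ((List.dropWhile_sublist pvNonDelim).subset (by rw [hr]; simp [hx]))
          have hbd : [d] = [' '] ∨ [d] = ['('] := by
            rcases hdel with rfl | rfl
            · exact Or.inl rfl
            · exact Or.inr rfl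
          rw [pvFoldA_delim d t' l' hmid hdd, ih t' ht'len ht'noI [d] hbd,
            pvJoinB_eq_cons hr]
          simp
      · -- the head is a delimiter: it passes through and resets the boundary
        have hdel := (pvNonDelim_false_iff c).mp (by simpa using hd)
        have hup : PySem.Chars.upper [c] = [c] := by
          rcases hdel with rfl | rfl <;> decide
        have hbc : [c] = [' '] ∨ [c] = ['('] := by
          rcases hdel with rfl | rfl
          · exact Or.inl rfl
          · exact Or.inr rfl
        have hcond : l = [' '] ∨ (c = 'i' ∧ l = ['I']) ∨ l = ['('] := by
          rcases hb with rfl | rfl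
          · exact Or.inl rfl
          · exact Or.inr (Or.inr rfl)
        have hcs : ∀ x ∈ cs, x ≠ 'I' := fun x hx => hnoI x (by simp [hx])
        have hcslen : cs.length ≤ n := by simp at hlen; omega
        simp only [pvFoldA]
        rw [if_pos hcond, hup, ih cs hcslen hcs [c] hbc,
          pvJoinB_eq_cons (List.dropWhile_cons_of_neg (by simp [hd]))]
        rw [List.takeWhile_cons_of_neg (by simp [hd])]
        simp [pvCap, PySem.Chars.upper]

-- ===== VERDICT (by name: the statement is the Claim_ definition above) =====
theorem prettify_name_spec : Claim_equal_prettify_name := by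
  intro name _
  unfold Spec_prettify_name prettify_name prettify_name_alt
  rw [pvFoldA_acc]
  have h := pvMain (PySem.Str.lower name).toList.length (PySem.Str.lower name).toList le_rfl
    (by simpa using pvNoI_lower name.toList) [' '] (Or.inl rfl)
  rw [h]
  rfl
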